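-- pv_equiv track=rewrite | github.com/mike96265/python-algorithms | ArithmeticSlices.py | solution
-- ===== SOURCE A (Python) =====
-- def solution(A):
--     length = len(A)
--     if length < 3:
--         return 0
--     sub_len = 2
--     sub = A[1] - A[0]
--     slices_sum = 0
--     for i in range(2, length):
--         temp_sub = A[i] - A[i - 1]
--         if temp_sub == sub:
--             sub_len += 1
--         else:
--             sub_len = 2
--             sub = temp_sub
--         if sub_len >= 3:
--             slices_sum += sub_len - 2
--     return slices_sum
-- ===== SOURCE B (Python) =====
-- def solution(A):
--     diffs = [b - a for a, b in zip(A, A[1:])]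
--     total = 0
--     c = 1
--     for prev, cur in zip(diffs, diffs[1:]):
--         if cur == prev:
--             c += 1
--         else:
--             total += c * (c - 1) // 2
--             c = 1
--     if diffs:
--         total += c * (c - 1) // 2
--     return total
-- ===== Notes on version B (the rewrite author's own statement) =====
-- stated objective: alternative
-- what changed: B first builds the list of adjacent differences, then scans it once counting the length c of each maximal run of equal consecutive differences and adds the closed form c*(c-1)//2 per run (with a final flush), instead of A's index loop that updates a running slice length and adds sub_len-2 at every step.
import Mathlib
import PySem

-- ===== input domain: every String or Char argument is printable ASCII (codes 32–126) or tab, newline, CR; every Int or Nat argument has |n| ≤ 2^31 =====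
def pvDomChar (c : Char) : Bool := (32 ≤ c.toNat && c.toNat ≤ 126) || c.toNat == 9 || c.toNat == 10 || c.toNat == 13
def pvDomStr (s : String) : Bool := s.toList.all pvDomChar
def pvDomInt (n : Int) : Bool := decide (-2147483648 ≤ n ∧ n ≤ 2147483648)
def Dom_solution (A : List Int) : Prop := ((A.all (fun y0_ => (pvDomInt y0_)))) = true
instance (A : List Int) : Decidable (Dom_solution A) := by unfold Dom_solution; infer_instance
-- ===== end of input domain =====

-- B replaces A's per-step counter bookkeeping by a run-length scan over consecutive
-- differences, flushing c*(c-1)//2 per maximal run (alternative decomposition, same cost).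

-- ===== PORT A =====
-- A's loop body: state (sub_len, sub, slices_sum), temp_sub already computed.
-- Indices i and i-1 lie in range for every i in range(2, len A), so the
-- default 0 of pyGetD is never used.
def solutionStep (st : Int × Int × Int) (temp_sub : Int) : Int × Int × Int :=
  let (sub_len, sub, slices_sum) := st
  let (sub_len, sub) := if temp_sub == sub then (sub_len + 1, sub) else (2, temp_sub)
  if sub_len ≥ 3 then (sub_len, sub, slices_sum + (sub_len - 2)) else (sub_len, sub, slices_sum)

def solution (A : List Int) : Int :=
  let length : Int := A.length
  if length < 3 then 0
  else
    let sub := PySem.List.pyGetD A 1 0 - PySem.List.pyGetD A 0 0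
    let st := (PySem.List.pyRange 2 length 1).foldl
      (fun st i => solutionStep st (PySem.List.pyGetD A i 0 - PySem.List.pyGetD A (i - 1) 0))
      (2, sub, 0)
    st.2.2

-- ===== PORT B =====
-- B's loop body: state (total, c); pair pc = (prev, cur) of consecutive diffs.
def solutionAltStep (st : Int × Int) (pc : Int × Int) : Int × Int :=
  if pc.2 == pc.1 then (st.1, st.2 + 1)
  else (st.1 + PySem.Int.floordiv (st.2 * (st.2 - 1)) 2, 1)

def solution_alt (A : List Int) : Int :=
  let diffs := (A.zip (A.drop 1)).map (fun p => p.2 - p.1)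
  let st := (diffs.zip (diffs.drop 1)).foldl solutionAltStep (0, 1)
  if diffs.isEmpty then st.1
  else st.1 + PySem.Int.floordiv (st.2 * (st.2 - 1)) 2

-- ===== PRECONDITION & SPEC =====
def Spec_solution (A : List Int) (out : Int) : Prop := out = solution_alt A
instance (A : List Int) (out : Int) : Decidable (Spec_solution A out) := by unfold Spec_solution; infer_instance

-- ===== CLAIM (what is proved, stated in full; the proofs are below) =====
def Claim_equal_solution : Prop := ∀ (A : List Int), Dom_solution A → Spec_solution A (solution A)

-- ===== LEMMAS AND PROOFS =====

-- Core invariant: A's fold over the remaining diffs ds with state (c+1, prev, total + c(c-1)/2)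
-- returns the same final sum as B's fold over the zipped pairs (prev::ds).zip ds followed by a flush.
lemma core_invariant (ds : List Int) : ∀ (prev c total : Int), 1 ≤ c →
    (ds.foldl solutionStep (c + 1, prev, total + PySem.Int.floordiv (c * (c - 1)) 2)).2.2
    = (((prev :: ds).zip ds).foldl solutionAltStep (total, c)).1
      + PySem.Int.floordiv ((((prev :: ds).zip ds).foldl solutionAltStep (total, c)).2
          * ((((prev :: ds).zip ds).foldl solutionAltStep (total, c)).2 - 1)) 2 := by
  induction ds with
  | nil => intro prev c total hc; simp
  | cons t rest ih =>
    intro prev c total hc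
    simp only [List.zip_cons_cons, List.foldl_cons]
    by_cases h : t = prev
    · have e1 : solutionStep (c + 1, prev, total + PySem.Int.floordiv (c * (c - 1)) 2) t
          = (c + 1 + 1, t, (total + PySem.Int.floordiv ((c + 1) * (c + 1 - 1)) 2)) := by
        subst h
        simp only [solutionStep, beq_self_eq_true, if_pos]
        have h3 : c + 1 + 1 ≥ 3 := by omega
        rw [if_pos h3]
        have : PySem.Int.floordiv (c * (c - 1)) 2 + (c + 1 + 1 - 2)
            = PySem.Int.floordiv ((c + 1) * (c + 1 - 1)) 2 := by
          rw [PySem.Int.floordiv_eq_ediv_of_pos (by omega),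
              PySem.Int.floordiv_eq_ediv_of_pos (by omega)]
          have hp : (c + 1) * (c + 1 - 1) = c * (c - 1) + 2 * c := by ring
          omega
        rw [← this]; ring_nf
      have e2 : solutionAltStep (total, c) (prev, t) = (total, c + 1) := by
        simp [solutionAltStep, h]
      rw [e1, e2, ih t (c + 1) total (by omega)]
    · have e1 : solutionStep (c + 1, prev, total + PySem.Int.floordiv (c * (c - 1)) 2) t
          = (1 + 1, t, (total + PySem.Int.floordiv (c * (c - 1)) 2)
              + PySem.Int.floordiv (1 * (1 - 1)) 2) := by
        simp [solutionStep, h]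
      have e2 : solutionAltStep (total, c) (prev, t)
          = (total + PySem.Int.floordiv (c * (c - 1)) 2, 1) := by
        simp [solutionAltStep, h]
      rw [e1, e2, ih t 1 (total + PySem.Int.floordiv (c * (c - 1)) 2) (by omega)]

-- A's index-based fold over range(a, len xs) equals a fold over zipped adjacent pairs of xs.
lemma range_fold_zip (xs : List Int) (g : (Int × Int × Int) → Int → (Int × Int × Int)) :
    ∀ (m : Nat) (a : Int) (st : Int × Int × Int), 2 ≤ a → a + m = xs.length →
    (PySem.List.pyRange a (xs.length : Int) 1).foldl
      (fun st i => g st (PySem.List.pyGetD xs i 0 - PySem.List.pyGetD xs (i - 1) 0)) st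
    = ((xs.drop (a - 1).toNat).zip (xs.drop a.toNat)).foldl
        (fun st p => g st (p.2 - p.1)) st := by
  intro m
  induction m with
  | zero =>
    intro a st h2 hlen
    rw [PySem.List.pyRange_one_eq_nil (by omega)]
    have hd : xs.drop a.toNat = [] := by
      apply List.drop_eq_nil_of_le; omega
    simp [hd]
  | succ k ih =>
    intro a st h2 hlen
    have ha : a < (xs.length : Int) := by omega
    rw [PySem.List.pyRange_one_cons ha]
    have h1 : (a - 1).toNat < xs.length := by omega
    have h0 : a.toNat < xs.length := by omega
    rw [List.drop_eq_getElem_cons h1, List.drop_eq_getElem_cons h0]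
    have e1 : (a - 1).toNat + 1 = a.toNat := by omega
    rw [e1, List.zip_cons_cons, List.foldl_cons, List.foldl_cons]
    have g1 : PySem.List.pyGetD xs a 0 = xs[a.toNat] := by
      exact PySem.List.pyGetD_eq_getElem xs 0 (by omega) (by exact_mod_cast ha)
    have g2 : PySem.List.pyGetD xs (a - 1) 0 = xs[(a - 1).toNat] := by
      exact PySem.List.pyGetD_eq_getElem xs 0 (by omega) (by omega)
    rw [g1, g2]
    have e2 : (a + 1 - 1).toNat = a.toNat := by omega
    have := ih (a + 1) (g st (xs[a.toNat] - xs[(a - 1).toNat])) (by omega) (by omega)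
    rw [e2] at this
    have e3 : (a + 1).toNat = a.toNat + 1 := by omega
    rw [e3] at this
    exact this

theorem solution_spec : Claim_equal_solution := by
  unfold Claim_equal_solution
  intro A _
  unfold Spec_solution
  match A with
  | [] => rfl
  | [x] => simp [solution, solution_alt]
  | [x, y] =>
    simp [solution, solution_alt]
  | x :: y :: z :: rs =>
    set ds' : List Int := (((y :: z :: rs)).zip (z :: rs)).map (fun p => p.2 - p.1) with hds'
    have hdiffs : ((x :: y :: z :: rs).zip ((x :: y :: z :: rs).drop 1)).map
        (fun p : Int × Int => p.2 - p.1) = (y - x) :: ds' := by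
      simp [hds']
    have hlen3 : ¬ (((x :: y :: z :: rs).length : Int) < 3) := by
      simp; omega
    have hzip := range_fold_zip (x :: y :: z :: rs) solutionStep
        ((x :: y :: z :: rs).length - 2) 2 (2, y - x, 0) (by omega) (by simp; omega)
    norm_num at hzip
    have hcore := core_invariant ds' (y - x) 1 0 (by omega)
    have hinit : ((1 : Int) + 1, y - x, (0 : Int) + PySem.Int.floordiv (1 * (1 - 1)) 2)
        = ((2 : Int), y - x, (0 : Int)) := by
      rw [PySem.Int.floordiv_eq_ediv_of_pos (by norm_num)]; norm_num
    rw [hinit] at hcore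
    have hg1 : PySem.List.pyGetD (x :: y :: z :: rs) 1 0 = y := by simp [pysem]
    have hg0 : PySem.List.pyGetD (x :: y :: z :: rs) 0 0 = x := by simp [pysem]
    show solution (x :: y :: z :: rs) = solution_alt (x :: y :: z :: rs)
    unfold solution solution_alt
    simp only [hdiffs]
    rw [if_neg hlen3, hg1, hg0]
    have hb : ((x :: y :: z :: rs).length : Int) = (rs.length : Int) + 1 + 1 + 1 := by simp
    rw [hb, hzip]
    have hdrop2 : List.drop (Int.toNat 2) (x :: y :: z :: rs) = z :: rs := rfl
    rw [hdrop2]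
    have hfold : ((y :: z :: rs).zip (z :: rs)).foldl
        (fun st p => solutionStep st (p.2 - p.1)) (2, y - x, 0)
        = ds'.foldl solutionStep (2, y - x, 0) := by
      rw [hds', List.foldl_map]
    rw [hfold]
    rw [if_neg (by simp : ¬((y - x) :: ds').isEmpty = true)]
    rw [(rfl : List.drop 1 ((y - x) :: ds') = ds')]
    exact hcore
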